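-- pv_equiv track=rewrite | github.com/gabnou/house-bot | bot/admin/router.py | _hb_preserve
-- ===== SOURCE A (Python) =====
-- _HB_PRESERVE = {
--     ".env",
--     "creds",
--     "logs",
--     "bridge/baileys_auth",
--     "bot/services/db",
--     "bot/ollama_models.json",
-- }
--
-- def _hb_preserve(rel_path: str) -> bool:
--     """Return True if rel_path (forward-slash, relative to project root) should be preserved."""
--     from pathlib import PurePosixPath
--     p = PurePosixPath(rel_path)
--     for preserved in _HB_PRESERVE:
--         pres = PurePosixPath(preserved)
--         if p == pres or p.parts[:len(pres.parts)] == pres.parts: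
--             return True
--     return False
-- ===== SOURCE B (Python) =====
-- # Walk the path's own ancestors (longest first) and test membership in a
-- # precomputed set of preserved component tuples, instead of scanning the
-- # preserved list comparing prefix slices per entry.
--
-- _PRESERVED_PARTS = {
--     (".env",),
--     ("creds",),
--     ("logs",),
--     ("bridge", "baileys_auth"),
--     ("bot", "services", "db"),
--     ("bot", "ollama_models.json"),
-- }
--
-- def _hb_preserve(rel_path: str) -> bool:
--     """Return True if rel_path (forward-slash, relative to project root) should be preserved."""
--     parts = tuple(c for c in rel_path.split("/") if c not in ("", "."))
--     return any(parts[:n] in _PRESERVED_PARTS for n in range(len(parts), -1, -1))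
-- ===== Notes on version B (the rewrite author's own statement) =====
-- stated objective: idiomatic
-- what changed: Instead of scanning the preserved list and comparing parts slices per entry, B precomputes a set of preserved component tuples and walks the path's own ancestors (longest first) testing set membership; Pre_ excludes absolute paths (leading slash), which are outside the documented relative-path domain and where A's PurePosixPath root part can make the values differ.
-- outside the precondition, e.g. on _hb_preserve('/.env'): A returns False, B returns True; on _hb_preserve('/ab'): A returns False, B returns False; on _hb_preserve('/'): A returns False, B returns False
import Mathlib
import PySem

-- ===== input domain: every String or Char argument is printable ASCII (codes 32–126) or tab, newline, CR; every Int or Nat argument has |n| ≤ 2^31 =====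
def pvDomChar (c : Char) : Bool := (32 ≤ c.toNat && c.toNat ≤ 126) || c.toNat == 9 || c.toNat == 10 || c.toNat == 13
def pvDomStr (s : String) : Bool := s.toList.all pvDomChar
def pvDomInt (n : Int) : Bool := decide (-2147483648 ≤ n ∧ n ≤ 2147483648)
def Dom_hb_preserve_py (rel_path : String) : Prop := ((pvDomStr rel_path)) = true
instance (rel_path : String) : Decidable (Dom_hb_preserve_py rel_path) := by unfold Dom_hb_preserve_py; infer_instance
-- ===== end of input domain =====

-- B replaces A's scan over the preserved prefixes (comparing parts slices) by a walk over the
-- path's own ancestors with a membership test in a precomputed set of preserved part tuples.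

-- ===== PORT A =====
-- PurePosixPath(s).parts: root part (exactly '//' for a double leading slash, '/' for any other
-- run of leading slashes) followed by the non-empty, non-'.' components of s.split('/')
def ppRoot (s : String) : List String :=
  if PySem.Str.startswith s "//" && !(PySem.Str.startswith s "///") then ["//"]
  else if PySem.Str.startswith s "/" then ["/"] else []

-- s.split('/'): split? with the nonempty separator "/" always returns some
def ppComps (s : String) : List String :=
  ((PySem.Str.split? s "/").getD []).filter (fun c => !(c == "") && !(c == "."))

def ppParts (s : String) : List String := ppRoot s ++ ppComps s

-- the set literal _HB_PRESERVE; A's loop is order-independent (it returns True if ANY entry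
-- matches), so iterating the set in insertion order is exact
def hbPreserveSet : PySem.Set String :=
  PySem.Set.ofList [".env", "creds", "logs", "bridge/baileys_auth", "bot/services/db", "bot/ollama_models.json"]

-- p.parts[:len(pres.parts)] is List.take (the slice bound is a nonnegative Nat here)
def hb_preserve_py (rel_path : String) : Bool :=
  let p := ppParts rel_path
  hbPreserveSet.any (fun preserved =>
    let pres := ppParts preserved
    (p == pres) || (p.take pres.length == pres))

-- ===== PORT B =====
-- the precomputed set _PRESERVED_PARTS of component tuples
def preservedParts : PySem.Set (List String) :=
  PySem.Set.ofList [[".env"], ["creds"], ["logs"], ["bridge", "baileys_auth"],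
                    ["bot", "services", "db"], ["bot", "ollama_models.json"]]

-- parts = the non-empty, non-'.' components of rel_path.split('/');
-- range(len(parts), -1, -1) yields n = len - i for i in range(len+1)
def hb_preserve_py_alt (rel_path : String) : Bool :=
  let parts := (((PySem.Str.split? rel_path "/").getD []).filter
    (fun c => !(c == "") && !(c == ".")))
  (List.range (parts.length + 1)).any (fun i =>
    preservedParts.contains (parts.take (parts.length - i)))

-- ===== PRECONDITION & SPEC =====
-- Pre_ excludes absolute paths (leading slash): they are outside the documented relative-path
-- domain, and A's PurePosixPath root part can make the values differ there.
def Pre_hb_preserve_py (rel_path : String) : Prop := PySem.Str.startswith rel_path "/" = false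
instance (rel_path : String) : Decidable (Pre_hb_preserve_py rel_path) := by unfold Pre_hb_preserve_py; infer_instance

def pvWitness_hb_preserve_py : String := "bot/services/db/x.sqlite"

def Spec_hb_preserve_py (rel_path : String) (out : Bool) : Prop := out = hb_preserve_py_alt rel_path
instance (rel_path : String) (out : Bool) : Decidable (Spec_hb_preserve_py rel_path out) := by unfold Spec_hb_preserve_py; infer_instance

-- ===== CLAIM (what is proved, stated in full; the proofs are below) =====
def Claim_equal_hb_preserve_py : Prop := ∀ (rel_path : String), Dom_hb_preserve_py rel_path → Pre_hb_preserve_py rel_path → Spec_hb_preserve_py rel_path (hb_preserve_py rel_path)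

-- ===== LEMMAS AND PROOFS =====

-- with no leading '/', PurePosixPath has no root part
lemma ppRoot_of_rel (s : String) (h : PySem.Str.startswith s "/" = false) : ppRoot s = [] := by
  have hc : PySem.Chars.startswith s.toList ['/'] = false := by
    simpa [PySem.Str.startswith] using h
  have h1 : ¬ ['/'] <+: s.toList := by
    intro hp
    rw [(PySem.Chars.startswith_iff _ _).mpr hp] at hc
    simp at hc
  have h2 : PySem.Chars.startswith s.toList ['/', '/'] = false := by
    rw [Bool.eq_false_iff]
    intro hp
    exact h1 (List.IsPrefix.trans ⟨['/'], rfl⟩ ((PySem.Chars.startswith_iff _ _).mp hp))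
  unfold ppRoot
  simp only [PySem.Str.startswith]
  simp [h2, hc]

-- A's slice condition (rootless) yields an ancestor of the path equal to that entry
lemma fwd (comps pres : List String)
    (h : comps.take pres.length = pres) :
    ∃ k ≤ comps.length, comps.take k = pres := by
  by_cases hle : pres.length ≤ comps.length
  · exact ⟨pres.length, hle, h⟩
  · rw [List.take_of_length_le (by omega)] at h
    exact ⟨comps.length, le_rfl, by rw [List.take_length]; exact h⟩

-- an ancestor equal to a preserved entry satisfies A's slice condition for that entry
lemma bwd (comps pres : List String) (k : ℕ) (hk : k ≤ comps.length)
    (h : comps.take k = pres) :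
    comps.take pres.length = pres := by
  subst h
  rw [List.length_take, Nat.min_eq_left hk]

lemma fwd' (comps pres : List String)
    (hslice : comps.take pres.length = pres)
    (hmem : List.contains [[".env"], ["creds"], ["logs"], ["bridge", "baileys_auth"],
        ["bot", "services", "db"], ["bot", "ollama_models.json"]] pres = true) :
    ∃ i < comps.length + 1,
      List.contains [[".env"], ["creds"], ["logs"], ["bridge", "baileys_auth"],
        ["bot", "services", "db"], ["bot", "ollama_models.json"]]
        (comps.take (comps.length - i)) = true := by
  obtain ⟨k, hk, hkeq⟩ := fwd comps pres hslice
  exact ⟨comps.length - k, by omega, by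
    rw [show comps.length - (comps.length - k) = k from by omega, hkeq]
    exact hmem⟩

lemma main_eq (s : String) (hpre : PySem.Str.startswith s "/" = false) :
    hb_preserve_py s = hb_preserve_py_alt s := by
  have hset : hbPreserveSet
      = [".env", "creds", "logs", "bridge/baileys_auth", "bot/services/db", "bot/ollama_models.json"] := by
    decide
  have hset2 : preservedParts = [[".env"], ["creds"], ["logs"], ["bridge", "baileys_auth"],
      ["bot", "services", "db"], ["bot", "ollama_models.json"]] := by decide
  have h1 : ppParts ".env" = [".env"] := by decide
  have h2 : ppParts "creds" = ["creds"] := by decide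
  have h3 : ppParts "logs" = ["logs"] := by decide
  have h4 : ppParts "bridge/baileys_auth" = ["bridge", "baileys_auth"] := by decide
  have h5 : ppParts "bot/services/db" = ["bot", "services", "db"] := by decide
  have h6 : ppParts "bot/ollama_models.json" = ["bot", "ollama_models.json"] := by decide
  have hroot : ppParts s = ppComps s := by
    unfold ppParts; rw [ppRoot_of_rel s hpre]; simp
  rw [Bool.eq_iff_iff]
  unfold hb_preserve_py hb_preserve_py_alt
  rw [hset, hset2, hroot]
  show _ ↔ ((List.range ((ppComps s).length + 1)).any _ = true)
  simp only [List.any_eq_true, Bool.or_eq_true, beq_iff_eq, List.mem_range]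
  constructor
  · rintro ⟨preserved, hmem, hcond⟩
    have hslice : (ppComps s).take (ppParts preserved).length = ppParts preserved := by
      rcases hcond with hc | hc
      · rw [hc, List.take_length]
      · exact hc
    simp only [List.mem_cons, List.not_mem_nil, or_false] at hmem
    rcases hmem with rfl | rfl | rfl | rfl | rfl | rfl
    · rw [h1] at hslice; exact fwd' _ _ hslice (by decide)
    · rw [h2] at hslice; exact fwd' _ _ hslice (by decide)
    · rw [h3] at hslice; exact fwd' _ _ hslice (by decide)
    · rw [h4] at hslice; exact fwd' _ _ hslice (by decide)
    · rw [h5] at hslice; exact fwd' _ _ hslice (by decide)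
    · rw [h6] at hslice; exact fwd' _ _ hslice (by decide)
  · rintro ⟨i, hi, hcont⟩
    have hk : (ppComps s).length - i ≤ (ppComps s).length := Nat.sub_le _ _
    simp at hcont
    rcases hcont with h | h | h | h | h | h
    · exact ⟨".env", by simp, Or.inr (by rw [h1]; exact bwd _ _ _ hk h)⟩
    · exact ⟨"creds", by simp, Or.inr (by rw [h2]; exact bwd _ _ _ hk h)⟩
    · exact ⟨"logs", by simp, Or.inr (by rw [h3]; exact bwd _ _ _ hk h)⟩
    · exact ⟨"bridge/baileys_auth", by simp, Or.inr (by rw [h4]; exact bwd _ _ _ hk h)⟩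
    · exact ⟨"bot/services/db", by simp, Or.inr (by rw [h5]; exact bwd _ _ _ hk h)⟩
    · exact ⟨"bot/ollama_models.json", by simp, Or.inr (by rw [h6]; exact bwd _ _ _ hk h)⟩

-- ===== VERDICT (by name: the statement is the Claim_ definition above) =====
theorem hb_preserve_py_spec : Claim_equal_hb_preserve_py := by
  intro s _ hpre
  unfold Spec_hb_preserve_py
  exact main_eq s hpre
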